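-- pv_equiv track=rewrite | github.com/Tsanhl/stock-advisor-skills.md | scripts/write_market_report_pdf.py | break_token
-- ===== SOURCE A (Python) =====
-- from typing import List, Tuple
--
-- def break_token(token: str, width: int) -> List[str]:
--     if len(token) <= width:
--         return [token]
--     out: List[str] = []
--     remaining = token
--     while len(remaining) > width:
--         split_points = [
--             remaining.rfind("/", 1, width),
--             remaining.rfind("-", 1, width),
--             remaining.rfind("_", 1, width),
--             remaining.rfind("?", 1, width),
--             remaining.rfind("&", 1, width),
--             remaining.rfind("=", 1, width),
--             remaining.rfind(".", 1, width),
--         ]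
--         cut = max(split_points)
--         if cut == -1 or cut < (width // 3):
--             out.append(remaining[:width])
--             remaining = remaining[width:]
--             continue
--         out.append(remaining[: cut + 1])
--         remaining = remaining[cut + 1 :]
--     if remaining:
--         out.append(remaining)
--     return out
-- ===== SOURCE B (Python) =====
-- from typing import List
--
-- _DELIMS = frozenset("/-_?&=.")
--
-- def break_token(token: str, width: int) -> List[str]:
--     n = len(token)
--     if n <= width:
--         return [token]
--     out: List[str] = []
--     i = 0
--     t = width // 3
--     while n - i > width:
--         cut = -1
--         for j in range(i + width - 1, i, -1):
--             if token[j] in _DELIMS: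
--                 cut = j - i
--                 break
--         if cut < t:
--             cut = width - 1
--         out.append(token[i : i + cut + 1])
--         i += cut + 1
--     out.append(token[i:])
--     return out
-- ===== Notes on version B (the rewrite author's own statement) =====
-- stated objective: alternative
-- what changed: B keeps an index pointer into the original string and finds each cut with one backward character scan over the current window (set membership), instead of re-slicing the remainder every iteration and taking the max of seven rfind calls on the copied substring.
import Mathlib
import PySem

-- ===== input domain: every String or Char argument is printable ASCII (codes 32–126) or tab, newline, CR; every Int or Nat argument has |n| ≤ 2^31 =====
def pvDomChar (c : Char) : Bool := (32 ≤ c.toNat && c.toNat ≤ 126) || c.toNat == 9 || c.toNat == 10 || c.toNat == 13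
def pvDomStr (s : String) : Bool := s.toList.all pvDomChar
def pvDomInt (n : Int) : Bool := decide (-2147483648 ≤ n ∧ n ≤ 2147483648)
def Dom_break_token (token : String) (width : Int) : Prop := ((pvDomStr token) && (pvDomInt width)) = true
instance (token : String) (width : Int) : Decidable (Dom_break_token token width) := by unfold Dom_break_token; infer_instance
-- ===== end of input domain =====

-- B replaces A's repeated remainder-slicing and the max of seven rfind calls per chunk by an
-- index pointer into the original string and one backward character scan per chunk (objective: alternative).

-- ===== PORT A =====

-- Python max(split_points) (the list is a nonempty literal, so the `none` default is unreachable)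
def breakTokenMax (l : List Int) : Int :=
  match PySem.List.max? l id with
  | some m => m
  | none => -1

-- the body of A's while-loop up to `cut = max(split_points)`
def breakTokenCutA (rem : List Char) (width : Int) : Int :=
  breakTokenMax
    [PySem.Chars.rfindFrom rem ['/'] 1 (some width),
     PySem.Chars.rfindFrom rem ['-'] 1 (some width),
     PySem.Chars.rfindFrom rem ['_'] 1 (some width),
     PySem.Chars.rfindFrom rem ['?'] 1 (some width),
     PySem.Chars.rfindFrom rem ['&'] 1 (some width),
     PySem.Chars.rfindFrom rem ['='] 1 (some width),
     PySem.Chars.rfindFrom rem ['.'] 1 (some width)]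

-- A's while-loop; fuel (token length + 1) is never exhausted on inputs admitted by Pre_
def breakTokenGoA (fuel : Nat) (rem : List Char) (width : Int) (out : List String) : List String :=
  match fuel with
  | 0 => out
  | fuel + 1 =>
    if width < (rem.length : Int) then
      let cut := breakTokenCutA rem width
      if cut = -1 ∨ cut < PySem.Int.floordiv width 3 then
        breakTokenGoA fuel (PySem.List.slice rem (some width) none) width
          (out ++ [String.ofList (PySem.List.slice rem none (some width))])
      else
        breakTokenGoA fuel (PySem.List.slice rem (some (cut + 1)) none) width
          (out ++ [String.ofList (PySem.List.slice rem none (some (cut + 1)))])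
    else
      if rem ≠ [] then out ++ [String.ofList rem] else out

def break_token (token : String) (width : Int) : List String :=
  if PySem.Str.len token ≤ width then [token]
  else breakTokenGoA (token.toList.length + 1) token.toList width []

-- ===== PORT B =====

-- B's module constant _DELIMS
def breakTokenDelims : List Char := ['/', '-', '_', '?', '&', '=', '.']

-- B's inner for-loop: first j in range(i+width-1, i, -1) with token[j] in _DELIMS, as cut = j - i.
-- (Python's token[j] is always in range where this loop runs; pyGet? + `false` is exact there.)
def breakTokenCutB (token : List Char) (width i : Int) : Int :=
  match (PySem.List.pyRange (i + width - 1) i (-1)).find?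
      (fun j => match PySem.List.pyGet? token j with
        | some c => decide (c ∈ breakTokenDelims)
        | none => false) with
  | some j => j - i
  | none => -1

-- B's while-loop; fuel (token length + 1) is never exhausted on inputs admitted by Pre_
def breakTokenGoB (fuel : Nat) (token : List Char) (width t i : Int) (out : List String) : List String :=
  match fuel with
  | 0 => out
  | fuel + 1 =>
    if width < (token.length : Int) - i then
      let cut0 := breakTokenCutB token width i
      let cut := if cut0 < t then width - 1 else cut0
      breakTokenGoB fuel token width t (i + cut + 1)
        (out ++ [String.ofList (PySem.List.slice token (some i) (some (i + cut + 1)))])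
    else
      out ++ [String.ofList (PySem.List.slice token (some i) none)]

def break_token_alt (token : String) (width : Int) : List String :=
  if PySem.Str.len token ≤ width then [token]
  else breakTokenGoB (token.toList.length + 1) token.toList width (PySem.Int.floordiv width 3) 0 []

-- ===== PRECONDITION & SPEC =====
-- Pre_ is exactly the set of inputs on which the Python A returns: if width < 1 and
-- len(token) > width, A's while-loop never shrinks `remaining` and A diverges.
def Pre_break_token (token : String) (width : Int) : Prop :=
  1 ≤ width ∨ PySem.Str.len token ≤ width
instance (token : String) (width : Int) : Decidable (Pre_break_token token width) := by
  unfold Pre_break_token; infer_instance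

def pvWitness_break_token : String × Int := ("ab/cd-ef", 4)

def Spec_break_token (token : String) (width : Int) (out : List String) : Prop := out = break_token_alt token width
instance (token : String) (width : Int) (out : List String) : Decidable (Spec_break_token token width out) := by unfold Spec_break_token; infer_instance

-- ===== CLAIM (what is proved, stated in full; the proofs are below) =====
def Claim_equal_break_token : Prop := ∀ (token : String) (width : Int), Dom_break_token token width → Pre_break_token token width → Spec_break_token token width (break_token token width)

-- ===== LEMMAS AND PROOFS =====

-- first element of J satisfying p, with Python's -1 for "no hit"
def pvFirstJ (J : List Int) (p : Int → Bool) : Int := (J.find? p).getD (-1)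

theorem pvFirstJ_cons (j : Int) (J : List Int) (p : Int → Bool) :
    pvFirstJ (j :: J) p = if p j then j else pvFirstJ J p := by
  by_cases h : p j <;> simp [pvFirstJ, h]

theorem pvFirstJ_congr (J : List Int) (p q : Int → Bool) (h : ∀ j ∈ J, p j = q j) :
    pvFirstJ J p = pvFirstJ J q := by
  induction J with
  | nil => rfl
  | cons j J ih =>
    rw [pvFirstJ_cons, pvFirstJ_cons, h j (by simp),
      ih (fun x hx => h x (by simp [hx]))]

theorem pvFirstJ_mem_or (J : List Int) (p : Int → Bool) :
    pvFirstJ J p ∈ J ∨ pvFirstJ J p = -1 := by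
  unfold pvFirstJ
  cases hf : J.find? p with
  | none => simp
  | some j => exact Or.inl (by simpa using List.mem_of_find?_eq_some hf)

theorem pvPrefix_single (c : Char) (l : List Char) :
    [c].isPrefixOf l = (l.head? == some c) := by
  cases l with
  | nil => simp [List.isPrefixOf]
  | cons a l => simp [List.isPrefixOf, BEq.comm]

-- rfind.go scans indices k, k-1, …, 0 and returns the first hit
theorem pvGo_eq (s : List Char) (c : Char) :
    ∀ k : Nat, PySem.Chars.rfind.go s [c] k
      = pvFirstJ (PySem.List.pyRange (k : Int) (-1) (-1)) (fun j => s[j.toNat]? == some c) := by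
  intro k
  induction k with
  | zero =>
    rw [PySem.List.pyRange_neg_one_cons (by norm_num), PySem.List.pyRange_neg_one_eq_nil (by norm_num)]
    rw [pvFirstJ_cons]
    simp only [PySem.Chars.rfind.go, pvPrefix_single]
    simp [pvFirstJ, List.head?_eq_getElem?]
  | succ k ih =>
    have hcons : PySem.List.pyRange ((k+1 : Nat) : Int) (-1) (-1)
        = ((k : Int) + 1) :: PySem.List.pyRange (k : Nat) (-1) (-1) := by
      have e : ((k+1 : Nat) : Int) = (k : Int) + 1 := by push_cast; ring
      rw [e, PySem.List.pyRange_neg_one_cons (by omega)]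
      norm_num
    rw [hcons, pvFirstJ_cons]
    simp only [PySem.Chars.rfind.go, pvPrefix_single, ih]
    rw [show (((k : Int) + 1)).toNat = k + 1 by omega, ← List.head?_drop]
    norm_cast

-- shift a descending scan by +1
theorem pvShift_one (m : Nat) (p : Int → Bool) :
    (if pvFirstJ (PySem.List.pyRange (m : Int) (-1) (-1)) p = -1 then -1
     else 1 + pvFirstJ (PySem.List.pyRange (m : Int) (-1) (-1)) p)
    = pvFirstJ (PySem.List.pyRange ((m : Int) + 1) 0 (-1)) (fun j => p (j - 1)) := by
  induction m with
  | zero =>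
    rw [PySem.List.pyRange_neg_one_cons (by norm_num), PySem.List.pyRange_neg_one_eq_nil (by norm_num),
      PySem.List.pyRange_neg_one_cons (by norm_num), PySem.List.pyRange_neg_one_eq_nil (by norm_num)]
    rw [pvFirstJ_cons, pvFirstJ_cons]
    norm_num
    by_cases h : p 0 <;> simp [h, pvFirstJ]
  | succ m ih =>
    have e1 : ((m+1 : Nat) : Int) = (m : Int) + 1 := by push_cast; ring
    have h1 : PySem.List.pyRange ((m+1 : Nat) : Int) (-1) (-1)
        = ((m : Int) + 1) :: PySem.List.pyRange (m : Int) (-1) (-1) := by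
      rw [e1, PySem.List.pyRange_neg_one_cons (by omega)]
      norm_num
    have h2 : PySem.List.pyRange (((m+1 : Nat) : Int) + 1) 0 (-1)
        = ((m : Int) + 2) :: PySem.List.pyRange ((m : Int) + 1) 0 (-1) := by
      rw [e1, show ((m : Int) + 1 + 1) = (m : Int) + 2 by ring,
        PySem.List.pyRange_neg_one_cons (by omega)]
      rw [show ((m : Int) + 2 - 1) = (m : Int) + 1 by ring]
    rw [h1, h2]
    simp only [pvFirstJ_cons]
    rw [show ((m : Int) + 2 - 1) = (m : Int) + 1 by ring]
    by_cases h : p ((m : Int) + 1)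
    · rw [if_pos h, if_pos h, if_neg (by omega : ¬ ((m : Int) + 1 = -1))]
      ring
    · rw [if_neg h, if_neg h]
      exact ih

-- descending range shifted by a constant
theorem pvRange_shift (a b c : Int) :
    PySem.List.pyRange (a + c) (b + c) (-1) = (PySem.List.pyRange a b (-1)).map (· + c) := by
  rw [PySem.List.pyRange_neg_one, PySem.List.pyRange_neg_one, List.map_map]
  have : a + c - (b + c) = a - b := by ring
  rw [this]
  exact List.map_congr_left (fun k _ => by simp; ring)

-- Python max over a nonempty list, as a fold
theorem pvMaxList_cons (l : List Int) : ∀ (a : Int),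
    breakTokenMax (a :: l) = l.foldl (fun m x => if m < x then x else m) a := by
  induction l with
  | nil => intro a; rfl
  | cons b l ih =>
    intro a
    have h1 : breakTokenMax (a :: b :: l) = breakTokenMax ((if a < b then b else a) :: l) := by
      by_cases h : a < b <;> simp [breakTokenMax, PySem.List.max?, h]
    rw [h1, ih]
    by_cases h : a < b <;> simp [h]

theorem pvFoldl_imax_eq (l : List Int) (a j : Int) (ha : a ≤ j)
    (hall : ∀ x ∈ l, x ≤ j) (hmem : j ∈ l ∨ a = j) :
    l.foldl (fun m x => if m < x then x else m) a = j := by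
  induction l generalizing a with
  | nil =>
    rcases hmem with h | h
    · simp at h
    · simpa using h
  | cons b l ih =>
    simp only [List.foldl]
    by_cases hb : a < b
    · simp only [if_pos hb]
      refine ih (a := b) (hall b (by simp)) (fun x hx => hall x (by simp [hx])) ?_
      rcases hmem with h | h
      · rcases List.mem_cons.1 h with rfl | h
        · exact Or.inr rfl
        · exact Or.inl h
      · subst h; have hb2 := hall b (by simp); omega
    · simp only [if_neg hb]
      refine ih (a := a) ha (fun x hx => hall x (by simp [hx])) ?_
      rcases hmem with h | h
      · rcases List.mem_cons.1 h with rfl | h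
        · right; omega
        · exact Or.inl h
      · exact Or.inr h

-- max over per-character first hits of a descending nonneg scan = first hit of the union
theorem pvMerge (p : Char → Int → Bool) (d0 : Char) (D : List Char) :
    ∀ (J : List Int), J.Pairwise (· > ·) → (∀ j ∈ J, 0 ≤ j) →
    breakTokenMax ((d0 :: D).map (fun d => pvFirstJ J (p d)))
      = pvFirstJ J (fun j => (d0 :: D).any (fun d => p d j)) := by
  intro J
  induction J with
  | nil =>
    intro _ _
    simp only [pvFirstJ, List.find?_nil, Option.getD_none, List.map_cons, pvMaxList_cons]
    have hrep : ∀ (n : Nat),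
        (List.replicate n (-1 : Int)).foldl (fun m x => if m < x then x else m) (-1) = -1 := by
      intro n
      induction n with
      | zero => rfl
      | succ n ihn => simpa [List.replicate_succ] using ihn
    simpa using hrep D.length
  | cons j J ih =>
    intro hpair h0
    have hj0 : (0 : Int) ≤ j := h0 j (by simp)
    have hlt : ∀ x ∈ J, x < j := fun x hx => (List.pairwise_cons.1 hpair).1 x hx
    have hbound : ∀ d, (if p d j then j else pvFirstJ J (p d)) ≤ j := by
      intro d
      by_cases h : p d j
      · simp [h]
      · simp only [if_neg h]
        rcases pvFirstJ_mem_or J (p d) with hm | hm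
        · exact le_of_lt (hlt _ hm)
        · omega
    by_cases hq : (d0 :: D).any (fun d => p d j)
    · rw [pvFirstJ_cons, if_pos hq]
      obtain ⟨d1, hd1, hpd1⟩ := List.any_eq_true.1 hq
      have emap : (d0 :: D).map (fun d => pvFirstJ (j :: J) (p d))
          = (d0 :: D).map (fun d => if p d j then j else pvFirstJ J (p d)) :=
        List.map_congr_left (fun d _ => pvFirstJ_cons j J (p d))
      rw [emap, List.map_cons, pvMaxList_cons]
      apply pvFoldl_imax_eq _ _ _ (hbound d0)
      · intro x hx
        obtain ⟨d, _, rfl⟩ := List.mem_map.1 hx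
        exact hbound d
      · rcases List.mem_cons.1 hd1 with rfl | hd1'
        · right; simp [hpd1]
        · left
          exact List.mem_map.2 ⟨d1, hd1', by simp [hpd1]⟩
    · have hall : ∀ d ∈ d0 :: D, p d j = false := by
        intro d hd
        by_contra hc
        exact hq (List.any_eq_true.2 ⟨d, hd, by simpa using hc⟩)
      have emap : (d0 :: D).map (fun d => pvFirstJ (j :: J) (p d))
          = (d0 :: D).map (fun d => pvFirstJ J (p d)) := by
        apply List.map_congr_left
        intro d hd
        rw [pvFirstJ_cons, hall d hd]
        simp
      rw [emap, pvFirstJ_cons, if_neg hq,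
        ih (List.Pairwise.of_cons hpair) (fun x hx => h0 x (by simp [hx]))]

theorem pvRange_desc (a b : Int) : (PySem.List.pyRange a b (-1)).Pairwise (· > ·) := by
  rw [PySem.List.pyRange_neg_one_eq_reverse]
  exact List.pairwise_reverse.2 (by simpa using PySem.List.pairwise_lt_pyRange_one (b+1) (a+1))

theorem pvBeq_decide (a b : Char) : (a == b) = decide (a = b) := by
  by_cases h : a = b <;> simp [h]

-- A's per-iteration cut equals B's per-iteration cut on the same window
theorem pvCut_eq (tok : List Char) (w i : Int) (h1 : 1 ≤ w) (h0 : 0 ≤ i)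
    (h2 : i + w < tok.length) :
    breakTokenCutA (tok.drop i.toNat) w = breakTokenCutB tok w i := by
  have hdlen : (tok.drop i.toNat).length = tok.length - i.toNat := List.length_drop
  have hwlt : w < ((tok.drop i.toNat).length : Int) := by omega
  set rem := tok.drop i.toNat with hrem
  set mid := List.drop 1 (List.take w.toNat rem) with hmid
  have hmidlen : mid.length = w.toNat - 1 := by
    rw [hmid, List.length_drop, List.length_take]
    omega
  have hrf : ∀ d : Char, PySem.Chars.rfindFrom rem [d] 1 (some w)
      = pvFirstJ (PySem.List.pyRange (w - 1) 0 (-1))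
          (fun j => mid[(j - 1).toNat]? == some d) := by
    intro d
    have estep : PySem.Chars.rfindFrom rem [d] 1 (some w)
        = (if PySem.Chars.rfind mid [d] = -1 then -1 else 1 + PySem.Chars.rfind mid [d]) := by
      simp only [PySem.Chars.rfindFrom]
      rw [if_neg (show ¬ ((rem.length : Int) < w) by omega),
        if_neg (show ¬ (w < (0 : Int)) by omega),
        if_neg (show ¬ ((1 : Int) < 0) by norm_num),
        if_neg (show ¬ (w < (1 : Int)) by omega)]
      norm_num [hmid]
    rw [estep]
    have ego : PySem.Chars.rfind mid [d]
        = pvFirstJ (PySem.List.pyRange (mid.length : Int) (-1) (-1))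
            (fun j => mid[j.toNat]? == some d) := by
      unfold PySem.Chars.rfind
      exact pvGo_eq mid d mid.length
    rw [ego, pvShift_one mid.length (fun j => mid[j.toNat]? == some d)]
    rw [show ((mid.length : Int) + 1) = w by omega]
    rw [PySem.List.pyRange_neg_one_cons (show (0 : Int) < w by omega), pvFirstJ_cons]
    rw [if_neg (show ¬ ((fun j => mid[(j - 1).toNat]? == some d) w = true) by
      simp only
      rw [show (w - 1).toNat = mid.length by omega]
      simp)]
  have hB : breakTokenCutB tok w i
      = pvFirstJ (PySem.List.pyRange (w - 1) 0 (-1)) (fun j =>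
          match PySem.List.pyGet? tok (j + i) with
          | some c => decide (c ∈ breakTokenDelims)
          | none => false) := by
    unfold breakTokenCutB
    have hrange : PySem.List.pyRange (i + w - 1) i (-1)
        = (PySem.List.pyRange (w - 1) 0 (-1)).map (· + i) := by
      rw [← pvRange_shift]
      congr 1 <;> ring
    rw [hrange, List.find?_map]
    unfold pvFirstJ
    simp only [Function.comp_def]
    cases hf : (PySem.List.pyRange (w - 1) 0 (-1)).find?
        (fun j => match PySem.List.pyGet? tok (j + i) with
          | some c => decide (c ∈ breakTokenDelims)
          | none => false) with
    | none => rfl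
    | some j =>
      simp only [Option.map_some, Option.getD_some]
      omega
  unfold breakTokenCutA
  simp only [hrf]
  have hdesc : (PySem.List.pyRange (w - 1) 0 (-1)).Pairwise (· > ·) := pvRange_desc (w - 1) 0
  have hnn : ∀ j ∈ PySem.List.pyRange (w - 1) 0 (-1), (0 : Int) ≤ j := by
    intro j hj
    have := PySem.List.mem_pyRange_neg_one.1 hj
    omega
  have hm := pvMerge (fun d j => mid[(j - 1).toNat]? == some d) '/' ['-', '_', '?', '&', '=', '.']
    (PySem.List.pyRange (w - 1) 0 (-1)) hdesc hnn
  simp only [List.map_cons, List.map_nil] at hm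
  rw [hm, hB]
  apply pvFirstJ_congr
  intro j hj
  have hjb := PySem.List.mem_pyRange_neg_one.1 hj
  have hgj : mid[(j - 1).toNat]? = tok[(j + i).toNat]? := by
    rw [hmid, List.getElem?_drop, show 1 + (j - 1).toNat = j.toNat by omega,
      List.getElem?_take_of_lt (show j.toNat < w.toNat by omega), hrem,
      List.getElem?_drop, show i.toNat + j.toNat = (j + i).toNat by omega]
  have hpg : PySem.List.pyGet? tok (j + i) = tok[(j + i).toNat]? := by
    conv_lhs => rw [show (j + i) = (((j + i).toNat : Nat) : Int) by omega]
    rw [PySem.List.pyGet?_natCast]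
  simp only [hgj, hpg]
  cases hx : tok[(j + i).toNat]? with
  | none => simp
  | some c =>
    simp [breakTokenDelims, List.any_cons, List.any_nil, pvBeq_decide]

theorem pvCutB_bounds (tok : List Char) (w i : Int) :
    breakTokenCutB tok w i = -1 ∨ (1 ≤ breakTokenCutB tok w i ∧ breakTokenCutB tok w i ≤ w - 1) := by
  unfold breakTokenCutB
  cases hf : (PySem.List.pyRange (i + w - 1) i (-1)).find?
      (fun j => match PySem.List.pyGet? tok j with
        | some c => decide (c ∈ breakTokenDelims)
        | none => false) with
  | none => simp
  | some j =>
    right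
    have hj := PySem.List.mem_pyRange_neg_one.1 (List.mem_of_find?_eq_some hf)
    simp only
    omega

theorem pvLoop_eq (fuel : Nat) : ∀ (tok : List Char) (w i : Int) (out : List String),
    1 ≤ w → 0 ≤ i → i < tok.length →
    breakTokenGoA fuel (tok.drop i.toNat) w out
      = breakTokenGoB fuel tok w (PySem.Int.floordiv w 3) i out := by
  induction fuel with
  | zero => intro tok w i out _ _ _; rfl
  | succ fuel ih =>
    intro tok w i out h1 h0 hi
    have ht0 : 0 ≤ PySem.Int.floordiv w 3 := by
      unfold PySem.Int.floordiv
      exact Int.fdiv_nonneg (by omega) (by omega)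
    have hdlen : (tok.drop i.toNat).length = tok.length - i.toNat := List.length_drop
    have hrlen : ((tok.drop i.toNat).length : Int) = (tok.length : Int) - i := by omega
    simp only [breakTokenGoA, breakTokenGoB]
    by_cases hc : w < ((tok.drop i.toNat).length : Int)
    · rw [if_pos hc, if_pos (show w < (tok.length : Int) - i by omega)]
      have hcut := pvCut_eq tok w i h1 h0 (by omega)
      rw [hcut]
      -- the fallback step, used by two of the three cases below
      have fallback :
          breakTokenGoA fuel (PySem.List.slice (tok.drop i.toNat) (some w) none) w
              (out ++ [String.ofList (PySem.List.slice (tok.drop i.toNat) none (some w))])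
            = breakTokenGoB fuel tok w (PySem.Int.floordiv w 3) (i + (w - 1) + 1)
              (out ++ [String.ofList (PySem.List.slice tok (some i) (some (i + (w - 1) + 1)))]) := by
        have e1 : PySem.List.slice (tok.drop i.toNat) (some w) none
            = tok.drop (i + w).toNat := by
          rw [PySem.List.slice_from _ (by omega), List.drop_drop]
          congr 1
          omega
        have e2 : PySem.List.slice (tok.drop i.toNat) none (some w)
            = PySem.List.slice tok (some i) (some (i + (w - 1) + 1)) := by
          rw [PySem.List.slice_to _ (by omega),
            PySem.List.slice_toNat _ h0 (by omega : (0:Int) ≤ i + (w - 1) + 1)]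
          congr 1
          omega
        rw [e1, e2, show i + (w - 1) + 1 = i + w by ring]
        exact ih tok w (i + w) _ h1 (by omega) (by omega)
      rcases pvCutB_bounds tok w i with hcm | hcb
      · rw [hcm]
        rw [if_pos (Or.inl rfl : (-1 : Int) = -1 ∨ (-1 : Int) < PySem.Int.floordiv w 3),
          if_pos (show (-1 : Int) < PySem.Int.floordiv w 3 by omega)]
        exact fallback
      · by_cases hct : breakTokenCutB tok w i < PySem.Int.floordiv w 3
        · rw [if_pos (Or.inr hct : breakTokenCutB tok w i = -1 ∨
              breakTokenCutB tok w i < PySem.Int.floordiv w 3), if_pos hct]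
          exact fallback
        · rw [if_neg (show ¬ (breakTokenCutB tok w i = -1 ∨
              breakTokenCutB tok w i < PySem.Int.floordiv w 3) by
                push Not
                exact ⟨by omega, by omega⟩), if_neg hct]
          have e1 : PySem.List.slice (tok.drop i.toNat) (some (breakTokenCutB tok w i + 1)) none
              = tok.drop (i + breakTokenCutB tok w i + 1).toNat := by
            rw [PySem.List.slice_from _ (by omega), List.drop_drop]
            congr 1
            omega
          have e2 : PySem.List.slice (tok.drop i.toNat) none (some (breakTokenCutB tok w i + 1))
              = PySem.List.slice tok (some i) (some (i + breakTokenCutB tok w i + 1)) := by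
            rw [PySem.List.slice_to _ (by omega),
              PySem.List.slice_toNat _ h0 (by omega : (0:Int) ≤ i + breakTokenCutB tok w i + 1)]
            congr 1
            omega
          rw [e1, e2]
          exact ih tok w (i + breakTokenCutB tok w i + 1) _ h1 (by omega) (by omega)
    · rw [if_neg hc, if_neg (show ¬ w < (tok.length : Int) - i by omega)]
      have hne : tok.drop i.toNat ≠ [] := by
        intro hnil
        rw [hnil] at hdlen
        simp at hdlen
        omega
      rw [if_pos hne, PySem.List.slice_from _ h0]
  

-- ===== VERDICT (by name: the statement is the Claim_ definition above) =====
theorem break_token_spec : Claim_equal_break_token := by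
  intro token width _hdom hpre
  unfold Spec_break_token break_token break_token_alt
  by_cases hle : PySem.Str.len token ≤ width
  · rw [if_pos hle, if_pos hle]
  · rw [if_neg hle, if_neg hle]
    have h1 : 1 ≤ width := hpre.resolve_right hle
    have e : PySem.Str.len token = (token.toList.length : Int) := by
      simp [PySem.Str.len_eq]
    have hlt : width < (token.toList.length : Int) := by
      rw [e] at hle; omega
    have h := pvLoop_eq (token.toList.length + 1) token.toList width 0 [] h1 le_rfl
      (by omega)
    simpa using h
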